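-- pv_equiv track=rewrite | github.com/mattsteinpreis/CodinGame | Python3/Community/Triforce.py | triforce
-- ===== SOURCE A (Python) =====
-- def startsize(n):
--     return n * 2 - 1
--
-- def triforce(n):
--     star_list = []
--     max_stars = startsize(n)
--
--     # bottom triangles
--     middle_buff = 1
--     left_buff = 0
--     n_stars = max_stars
--     for i in range(n):
--         star_str = (' ' * left_buff) + \
--                    ('*' * n_stars) + \
--                    (' ' * middle_buff) + \
--                    ('*' * n_stars)
--         star_list.append(star_str)
--         middle_buff += 2
--         left_buff += 1
--         n_stars -= 2
--
--     # top triangle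
--     n_stars = max_stars
--     for i in range(n):
--         star_str = (' ' * left_buff) + \
--                    ('*' * n_stars)
--         if i == n - 1:
--             star_str = '.' + star_str[1:]
--         star_list.append(star_str)
--         left_buff += 1
--         n_stars -= 2
--
--     return star_list
-- ===== SOURCE B (Python) =====
-- def triforce(n):
--     if n <= 0:
--         return []
--     rows = []
--     l = '*' * (2*n - 1)          # left-triangle row: i spaces then 2n-1-2i stars
--     pad = ' '                    # i+1 spaces
--     for _ in range(n):
--         rows.append(l + pad + l) # a bottom row is symmetric: l, gap, l again
--         l = ' ' + l[:-2]
--         pad += ' '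
--     t = ' ' * n + '*' * (2*n - 1)
--     for _ in range(n - 1):
--         rows.append(t)
--         t = ' ' + t[:-2]
--     rows.append('.' + t[1:])
--     return rows
-- ===== Notes on version B (the rewrite author's own statement) =====
-- stated objective: alternative
-- what changed: B builds each row from the previous one by slicing (row = ' ' + prev[:-2]) and assembles a bottom row from a shared left-triangle half as l + pad + l, instead of A's per-row concatenation of space/star runs recomputed from mutable buffer counters and A's '.'-splice of the last generated row.
import Mathlib
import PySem

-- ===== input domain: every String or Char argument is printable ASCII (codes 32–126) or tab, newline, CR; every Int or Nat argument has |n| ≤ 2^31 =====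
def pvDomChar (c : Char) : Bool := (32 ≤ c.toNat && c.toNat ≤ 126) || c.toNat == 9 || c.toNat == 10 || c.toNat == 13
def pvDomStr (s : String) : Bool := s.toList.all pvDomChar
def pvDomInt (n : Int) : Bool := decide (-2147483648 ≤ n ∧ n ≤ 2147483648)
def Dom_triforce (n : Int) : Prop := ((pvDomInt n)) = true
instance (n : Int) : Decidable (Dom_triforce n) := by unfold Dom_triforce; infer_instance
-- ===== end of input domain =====

-- B derives each row from the previous one by slicing (and builds bottom rows from a shared half: l + pad + l) instead of A's per-row run concatenation driven by mutable buffer counters; objective: alternative decomposition, return value proved equal.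


-- ===== PORT A =====
def startsize (n : Int) : Int := n * 2 - 1

def triforce (n : Int) : List String :=
  let maxStars := startsize n
  -- bottom triangles: state (star_list, middle_buff, left_buff, n_stars)
  let s1 := (PySem.List.pyRange 0 n 1).foldl
    (fun (st : List String × Int × Int × Int) _i =>
      let row := PySem.List.pyRepeat [' '] st.2.2.1 ++ PySem.List.pyRepeat ['*'] st.2.2.2 ++
                 PySem.List.pyRepeat [' '] st.2.1 ++ PySem.List.pyRepeat ['*'] st.2.2.2
      (st.1 ++ [String.ofList row], st.2.1 + 2, st.2.2.1 + 1, st.2.2.2 - 2))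
    ([], 1, 0, maxStars)
  -- top triangle: state (star_list, left_buff, n_stars); left_buff carried over from loop 1
  let s2 := (PySem.List.pyRange 0 n 1).foldl
    (fun (st : List String × Int × Int) i =>
      let row0 := PySem.List.pyRepeat [' '] st.2.1 ++ PySem.List.pyRepeat ['*'] st.2.2
      let row := if i = n - 1 then '.' :: PySem.List.slice row0 (some 1) none else row0
      (st.1 ++ [String.ofList row], st.2.1 + 1, st.2.2 - 2))
    (s1.1, s1.2.2.1, maxStars)
  s2.1

-- ===== PORT B =====
def triforce_alt (n : Int) : List String :=
  if n ≤ 0 then [] else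
  -- bottom rows: state (rows, l, pad); a bottom row is l + pad + l
  let s1 := (PySem.List.pyRange 0 n 1).foldl
    (fun (st : List String × List Char × List Char) _i =>
      (st.1 ++ [String.ofList (st.2.1 ++ st.2.2 ++ st.2.1)],
       ' ' :: PySem.List.slice st.2.1 none (some (-2)),
       st.2.2 ++ [' ']))
    ([], PySem.List.pyRepeat ['*'] (2*n - 1), [' '])
  -- top rows: state (rows, t); each row derived from the previous by t = ' ' + t[:-2]
  let s2 := (PySem.List.pyRange 0 (n-1) 1).foldl
    (fun (st : List String × List Char) _i =>
      (st.1 ++ [String.ofList st.2], ' ' :: PySem.List.slice st.2 none (some (-2))))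
    (s1.1, PySem.List.pyRepeat [' '] n ++ PySem.List.pyRepeat ['*'] (2*n - 1))
  s2.1 ++ [String.ofList ('.' :: PySem.List.slice s2.2 (some 1) none)]

-- ===== PRECONDITION & SPEC =====
def Spec_triforce (n : Int) (out : List String) : Prop := out = triforce_alt n
instance (n : Int) (out : List String) : Decidable (Spec_triforce n out) := by unfold Spec_triforce; infer_instance

-- ===== CLAIM (what is proved, stated in full; the proofs are below) =====
def Claim_equal_triforce : Prop := ∀ (n : Int), Dom_triforce n → Spec_triforce n (triforce n)

-- ===== LEMMAS AND PROOFS =====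

-- canonical forms of the rows, as functions of the row index
def rowBot (n i : Int) : List Char :=
  List.replicate i.toNat ' ' ++ List.replicate (2*n-1-2*i).toNat '*' ++
  List.replicate (1+2*i).toNat ' ' ++ List.replicate (2*n-1-2*i).toNat '*'

def rowTop (n i : Int) : List Char :=
  if i = n-1 then
    '.' :: (List.replicate ((n+i).toNat - 1) ' ' ++ List.replicate (2*n-1-2*i).toNat '*')
  else
    List.replicate (n+i).toNat ' ' ++ List.replicate (2*n-1-2*i).toNat '*'

-- left-triangle row / top row canonical state of B's loops
def canonL (n a : Int) : List Char :=
  List.replicate a.toNat ' ' ++ List.replicate (2*n-1-2*a).toNat '*'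

def canonT (n a : Int) : List Char :=
  List.replicate (n+a).toNat ' ' ++ List.replicate (2*n-1-2*a).toNat '*'

-- dropping the first cell of a padded row
lemma tail_repl_append (p : Nat) (c : Char) (xs : List Char) (h : 0 < p) :
    (List.replicate p c ++ xs).tail = List.replicate (p-1) c ++ xs := by
  obtain ⟨m, rfl⟩ : ∃ m, p = m + 1 := ⟨p - 1, by omega⟩
  simp [List.replicate_succ]

-- B's row step: prepend a space, cut the last two stars
lemma shiftL (a s : Nat) (h : 2 ≤ s) :
    ' ' :: PySem.List.slice (List.replicate a ' ' ++ List.replicate s '*') none (some (-2))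
      = List.replicate (a+1) ' ' ++ List.replicate (s-2) '*' := by
  rw [PySem.List.slice_to_neg_ofNat _ 2 (by omega)]
  have h1 := List.take_length_add_append (l₁ := List.replicate a ' ') (l₂ := List.replicate s '*') (i := s - 2)
  simp only [List.length_replicate] at h1
  simp only [List.length_append, List.length_replicate]
  rw [show a + s - 2 = a + (s - 2) from by omega, h1, List.take_replicate,
      Nat.min_eq_left (by omega), List.replicate_succ, List.cons_append]

-- a bottom row is the left-triangle row, a pad, and the left-triangle row again
lemma rowBot_sym (n a : Int) (h0 : 0 ≤ a) :
    canonL n a ++ List.replicate (a+1).toNat ' ' ++ canonL n a = rowBot n a := by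
  unfold canonL rowBot
  rw [show (1+2*a).toNat = (a+1).toNat + a.toNat from by omega, List.replicate_add]
  simp only [List.append_assoc]

-- A, loop 1 invariant
lemma loopA1 (n : Int) (k : Nat) : ∀ (a mb ns : Int) (acc : List String), a + k = n → 0 ≤ a →
    mb = 1 + 2*a → ns = 2*n-1-2*a →
    ((PySem.List.pyRange a n 1).foldl
      (fun (st : List String × Int × Int × Int) _i =>
        let row := PySem.List.pyRepeat [' '] st.2.2.1 ++ PySem.List.pyRepeat ['*'] st.2.2.2 ++
                   PySem.List.pyRepeat [' '] st.2.1 ++ PySem.List.pyRepeat ['*'] st.2.2.2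
        (st.1 ++ [String.ofList row], st.2.1 + 2, st.2.2.1 + 1, st.2.2.2 - 2))
      (acc, mb, a, ns))
    = (acc ++ (PySem.List.pyRange a n 1).map (fun i => String.ofList (rowBot n i)), 1 + 2*n, n, 2*n-1-2*n) := by
  induction k with
  | zero =>
    intro a mb ns acc hk ha hmb hns
    obtain rfl : a = n := by omega
    subst hmb hns
    rw [PySem.List.pyRange_one_eq_nil le_rfl]
    simp
  | succ k ih =>
    intro a mb ns acc hk ha hmb hns
    subst hmb hns
    rw [PySem.List.pyRange_one_cons (by omega)]
    have hrow : PySem.List.pyRepeat [' '] a ++ PySem.List.pyRepeat ['*'] (2*n-1-2*a) ++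
                PySem.List.pyRepeat [' '] (1 + 2*a) ++ PySem.List.pyRepeat ['*'] (2*n-1-2*a) = rowBot n a := by
      simp only [PySem.List.pyRepeat_singleton, rowBot]
    have hstep := ih (a+1) (1 + 2*a + 2) (2*n-1-2*a - 2)
      (acc ++ [String.ofList (rowBot n a)]) (by omega) (by omega) (by omega) (by omega)
    simp only [List.foldl_cons, List.map_cons, hrow]
    rw [hstep]
    simp [List.append_assoc]

-- A, loop 2 invariant
lemma loopA2 (n : Int) (k : Nat) : ∀ (a lb ns : Int) (acc : List String), a + k = n → 0 ≤ a →
    lb = n + a → ns = 2*n-1-2*a →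
    ((PySem.List.pyRange a n 1).foldl
      (fun (st : List String × Int × Int) i =>
        let row0 := PySem.List.pyRepeat [' '] st.2.1 ++ PySem.List.pyRepeat ['*'] st.2.2
        let row := if i = n - 1 then '.' :: PySem.List.slice row0 (some 1) none else row0
        (st.1 ++ [String.ofList row], st.2.1 + 1, st.2.2 - 2))
      (acc, lb, ns)).1
    = acc ++ (PySem.List.pyRange a n 1).map (fun i => String.ofList (rowTop n i)) := by
  induction k with
  | zero =>
    intro a lb ns acc hk ha hlb hns
    rw [PySem.List.pyRange_one_eq_nil (by omega)]
    simp
  | succ k ih =>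
    intro a lb ns acc hk ha hlb hns
    subst hlb hns
    rw [PySem.List.pyRange_one_cons (by omega)]
    have hrow : (if a = n - 1 then
          '.' :: PySem.List.slice (PySem.List.pyRepeat [' '] (n + a) ++ PySem.List.pyRepeat ['*'] (2*n-1-2*a)) (some 1) none
        else PySem.List.pyRepeat [' '] (n + a) ++ PySem.List.pyRepeat ['*'] (2*n-1-2*a)) = rowTop n a := by
      simp only [PySem.List.pyRepeat_singleton]
      unfold rowTop
      by_cases hlast : a = n - 1
      · rw [if_pos hlast, if_pos hlast, PySem.List.slice_from_one,
            tail_repl_append _ _ _ (by omega)]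
      · rw [if_neg hlast, if_neg hlast]
    have hstep := ih (a+1) (n + a + 1) (2*n-1-2*a - 2)
      (acc ++ [String.ofList (rowTop n a)]) (by omega) (by omega) (by omega) (by omega)
    simp only [List.foldl_cons, List.map_cons, hrow]
    rw [hstep]
    simp [List.append_assoc]

-- B, loop 1 invariant (the final l and pad are irrelevant, so only the row list is stated;
-- the disjunct a = n lets the invariant pass the last step, whose l is never used)
lemma loopB1 (n : Int) (k : Nat) : ∀ (a : Int) (l pad : List Char) (acc : List String),
    a + k = n → 0 ≤ a → (l = canonL n a ∨ a = n) → pad = List.replicate (a+1).toNat ' ' →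
    ((PySem.List.pyRange a n 1).foldl
      (fun (st : List String × List Char × List Char) _i =>
        (st.1 ++ [String.ofList (st.2.1 ++ st.2.2 ++ st.2.1)],
         ' ' :: PySem.List.slice st.2.1 none (some (-2)),
         st.2.2 ++ [' ']))
      (acc, l, pad)).1
    = acc ++ (PySem.List.pyRange a n 1).map (fun i => String.ofList (rowBot n i)) := by
  induction k with
  | zero =>
    intro a l pad acc hk ha hl hpad
    rw [PySem.List.pyRange_one_eq_nil (by omega)]
    simp
  | succ k ih =>
    intro a l pad acc hk ha hl hpad
    obtain hl | hl := hl
    swap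
    · omega
    subst hl hpad
    rw [PySem.List.pyRange_one_cons (by omega)]
    have hrow : canonL n a ++ List.replicate (a+1).toNat ' ' ++ canonL n a = rowBot n a :=
      rowBot_sym n a ha
    have hpad' : List.replicate (a+1).toNat ' ' ++ [' '] = List.replicate (a+1+1).toNat ' ' := by
      rw [show (a+1+1).toNat = (a+1).toNat + 1 from by omega, List.replicate_succ']
    have hl' : ' ' :: PySem.List.slice (canonL n a) none (some (-2)) = canonL n (a+1) ∨ a + 1 = n := by
      by_cases hk0 : a + 1 = n
      · exact Or.inr hk0
      · left
        unfold canonL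
        rw [shiftL _ _ (by omega)]
        congr 1
        · rw [show (a+1).toNat = a.toNat + 1 from by omega]
        · congr 1
          omega
    have hstep := ih (a+1) (' ' :: PySem.List.slice (canonL n a) none (some (-2)))
      (List.replicate (a+1).toNat ' ' ++ [' ']) (acc ++ [String.ofList (rowBot n a)])
      (by omega) (by omega) hl' hpad' 
    simp only [List.foldl_cons, List.map_cons, hrow]
    rw [hstep]
    simp [List.append_assoc]

-- B, loop 2 invariant (here the final t matters: it carries the last row)
lemma loopB2 (n : Int) (k : Nat) : ∀ (a : Int) (t : List Char) (acc : List String),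
    a + k = n - 1 → 0 ≤ a → t = canonT n a →
    ((PySem.List.pyRange a (n-1) 1).foldl
      (fun (st : List String × List Char) _i =>
        (st.1 ++ [String.ofList st.2], ' ' :: PySem.List.slice st.2 none (some (-2))))
      (acc, t))
    = (acc ++ (PySem.List.pyRange a (n-1) 1).map (fun i => String.ofList (rowTop n i)), canonT n (n-1)) := by
  induction k with
  | zero =>
    intro a t acc hk ha ht
    obtain rfl : a = n - 1 := by omega
    subst ht
    rw [PySem.List.pyRange_one_eq_nil le_rfl]
    simp
  | succ k ih =>
    intro a t acc hk ha ht
    subst ht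
    rw [PySem.List.pyRange_one_cons (by omega)]
    have hrow : canonT n a = rowTop n a := by
      unfold canonT rowTop
      rw [if_neg (by omega)]
    have ht' : ' ' :: PySem.List.slice (canonT n a) none (some (-2)) = canonT n (a+1) := by
      unfold canonT
      rw [shiftL _ _ (by omega)]
      congr 1
      · rw [show (n+(a+1)).toNat = (n+a).toNat + 1 from by omega]
      · congr 1
        omega
    have hstep := ih (a+1) (' ' :: PySem.List.slice (canonT n a) none (some (-2)))
      (acc ++ [String.ofList (canonT n a)]) (by omega) (by omega) ht'
    simp only [List.foldl_cons, List.map_cons]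
    rw [hstep, hrow]
    simp [List.append_assoc]

-- B's closing row is the canonical last top row
lemma lastRow_eq (n : Int) (h1 : 0 < n) :
    '.' :: PySem.List.slice (canonT n (n-1)) (some 1) none = rowTop n (n-1) := by
  unfold canonT rowTop
  rw [if_pos rfl, PySem.List.slice_from_one, tail_repl_append _ _ _ (by omega)]

-- ===== VERDICT (by name: the statement is the Claim_ definition above) =====
theorem triforce_spec : Claim_equal_triforce := by
  intro n _
  show triforce n = triforce_alt n
  simp only [triforce, triforce_alt, startsize]
  by_cases hn : 0 < n
  · rw [if_neg (by omega)]
    rw [loopA1 n n.toNat 0 1 (n*2-1) [] (by omega) le_rfl (by ring) (by ring)]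
    simp only [List.nil_append]
    rw [loopA2 n n.toNat 0 n (n*2-1) ((PySem.List.pyRange 0 n 1).map (fun i => String.ofList (rowBot n i)))
        (by omega) le_rfl (by ring) (by ring)]
    rw [loopB1 n n.toNat 0 (PySem.List.pyRepeat ['*'] (2*n - 1)) [' '] [] (by omega) le_rfl
        (Or.inl (by unfold canonL; rw [PySem.List.pyRepeat_singleton]; congr 2 <;> omega))
        (by rw [show ((0:Int)+1).toNat = 1 from by omega]; rfl)]
    simp only [List.nil_append]
    rw [loopB2 n (n-1).toNat 0 (PySem.List.pyRepeat [' '] n ++ PySem.List.pyRepeat ['*'] (2*n - 1))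
        ((PySem.List.pyRange 0 n 1).map (fun i => String.ofList (rowBot n i))) (by omega) le_rfl
        (by unfold canonT; rw [PySem.List.pyRepeat_singleton, PySem.List.pyRepeat_singleton]; congr 3 <;> omega)]
    rw [lastRow_eq n hn]
    have hsplit : (PySem.List.pyRange 0 n 1).map (fun i => String.ofList (rowTop n i)) =
        (PySem.List.pyRange 0 (n-1) 1).map (fun i => String.ofList (rowTop n i)) ++
        [String.ofList (rowTop n (n-1))] := by
      conv_lhs => rw [show n = (n-1)+1 from by ring, PySem.List.pyRange_one_succ_right (by omega)]
      simp
    rw [hsplit, List.append_assoc]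
  · rw [if_pos (by omega), PySem.List.pyRange_one_eq_nil (by omega)]
    simp
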